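-- pv_equiv track=rewrite | github.com/gigamonkey/ear-training | progressive.py | align_guess
-- ===== SOURCE A (Python) =====
-- def align_guess(guess, actual):
--     if len(guess) <= len(actual):
--         # Slide guess up to see if it matches some part of actual.
--         for i in range((len(actual) - len(guess)) + 1):
--             aligned = tuple(n + actual[i] for n in guess)
--             if aligned == actual[i : i + len(guess)]:
--                 return aligned
--     else:
--         # Slide guess down to see if some upper part matches actual.
--         for i in range((len(guess) - len(actual)) + 1):
--             aligned = tuple(n - actual[i] for n in guess)
--             if aligned[i:] == actual:
--                 return aligned
--
--     return guess
-- ===== SOURCE B (Python) =====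
-- def align_guess(guess, actual):
--     lg, la = len(guess), len(actual)
--     if lg <= la:
--         # A matching window forces the shift to be actual[i], so a non-empty guess
--         # must start at 0; an empty guess trivially aligns to itself.
--         if lg == 0 or guess[0] != 0:
--             return guess
--         # Reduce to: find guess's consecutive-difference sequence inside actual's.
--         dg = [y - x for x, y in zip(guess, guess[1:])]
--         da = [y - x for x, y in zip(actual, actual[1:])]
--         for i in range(la - lg + 1):
--             if da[i:i + lg - 1] == dg:
--                 s = actual[i]
--                 return tuple(g + s for g in guess)
--         return guess
--     else:
--         # Only offset lg - la gives a tail of the right length.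
--         i0 = lg - la
--         s = actual[i0]
--         if all(guess[i0 + j] - s == actual[j] for j in range(la)):
--             return tuple(g - s for g in guess)
--         return guess
-- ===== Notes on version B (the rewrite author's own statement) =====
-- stated objective: alternative
-- what changed: B exploits that a matching window forces the shift to equal actual[i]: a non-empty guess must start at 0 (immediate reject otherwise), branch 1 is reduced to finding guess's consecutive-difference sequence as a contiguous run inside actual's (both built once with zip) instead of building a full shifted tuple per window, and branch 2's loop disappears because only offset len(guess)-len(actual) gives a tail of the right length, so B does a single short-circuit check there.
import Mathlib
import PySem

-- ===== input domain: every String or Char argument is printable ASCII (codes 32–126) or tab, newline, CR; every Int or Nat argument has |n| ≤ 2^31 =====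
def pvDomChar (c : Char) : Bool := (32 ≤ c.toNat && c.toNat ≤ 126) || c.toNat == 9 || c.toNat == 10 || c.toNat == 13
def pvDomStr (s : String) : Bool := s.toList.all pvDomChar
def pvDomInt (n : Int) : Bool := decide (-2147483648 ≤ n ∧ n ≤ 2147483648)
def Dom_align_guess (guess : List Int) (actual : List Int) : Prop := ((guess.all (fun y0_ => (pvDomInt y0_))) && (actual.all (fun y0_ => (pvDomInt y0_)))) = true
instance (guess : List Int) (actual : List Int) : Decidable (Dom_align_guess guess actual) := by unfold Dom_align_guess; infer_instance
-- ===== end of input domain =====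

-- B replaces A's per-window tuple building by a first-element reject, a search for guess's
-- consecutive-difference sequence inside actual's, and a single length-forced check in the
-- second branch (objective: alternative algorithm; worst-case cost unchanged).

-- ===== PORT A =====
-- for i in range(...): aligned = tuple(n + actual[i] for n in guess); if aligned == actual[i:i+len(guess)]: return aligned
def aLoop1 (guess actual : List Int) : List Int → List Int
  | [] => guess
  | i :: rest =>
    let aligned := guess.map (fun n => n + PySem.List.pyGetD actual i 0)
    if aligned = PySem.List.slice actual (some i) (some (i + (guess.length : Int))) then aligned
    else aLoop1 guess actual rest

-- for i in range(...): aligned = tuple(n - actual[i] for n in guess); if aligned[i:] == actual: return aligned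
def aLoop2 (guess actual : List Int) : List Int → List Int
  | [] => guess
  | i :: rest =>
    let aligned := guess.map (fun n => n - PySem.List.pyGetD actual i 0)
    if PySem.List.slice aligned (some i) none = actual then aligned
    else aLoop2 guess actual rest

def align_guess (guess : List Int) (actual : List Int) : List Int :=
  if guess.length ≤ actual.length then
    aLoop1 guess actual (PySem.List.pyRange 0 ((actual.length : Int) - (guess.length : Int) + 1) 1)
  else
    aLoop2 guess actual (PySem.List.pyRange 0 ((guess.length : Int) - (actual.length : Int) + 1) 1)

-- ===== PORT B =====
-- [y - x for x, y in zip(xs, xs[1:])]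
def bDiffs (xs : List Int) : List Int :=
  (xs.zip (PySem.List.slice xs (some 1) none)).map (fun p => p.2 - p.1)

-- for i in range(...): if da[i:i+lg-1] == dg: return tuple(g + actual[i] for g in guess)
def bSearch (guess actual dg da : List Int) : List Int → List Int
  | [] => guess
  | i :: rest =>
    if PySem.List.slice da (some i) (some (i + (guess.length : Int) - 1)) = dg then
      guess.map (fun g => g + PySem.List.pyGetD actual i 0)
    else bSearch guess actual dg da rest

def align_guess_alt (guess : List Int) (actual : List Int) : List Int :=
  if guess.length ≤ actual.length then
    if guess.length = 0 ∨ PySem.List.pyGetD guess 0 0 ≠ 0 then guess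
    else
      bSearch guess actual (bDiffs guess) (bDiffs actual)
        (PySem.List.pyRange 0 ((actual.length : Int) - (guess.length : Int) + 1) 1)
  else
    let s := PySem.List.pyGetD actual ((guess.length : Int) - (actual.length : Int)) 0
    if (PySem.List.pyRange 0 ((actual.length : Int)) 1).all
        (fun j => PySem.List.pyGetD guess (((guess.length : Int) - (actual.length : Int)) + j) 0 - s
                    == PySem.List.pyGetD actual j 0) then
      guess.map (fun g => g - s)
    else guess

-- ===== PRECONDITION & SPEC =====
-- Pre_ excludes exactly the inputs where A raises IndexError: in the second branch
-- (len(guess) > len(actual)) the loop reads actual[i] for i up to len(guess) - len(actual),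
-- which runs past the end of actual when len(guess) ≥ 2 * len(actual).
def Pre_align_guess (guess : List Int) (actual : List Int) : Prop :=
  guess.length ≤ actual.length ∨ guess.length < 2 * actual.length
instance (guess : List Int) (actual : List Int) : Decidable (Pre_align_guess guess actual) := by
  unfold Pre_align_guess; infer_instance

def pvWitness_align_guess : List Int × List Int := ([0, 2], [3, 3, 5])

def Spec_align_guess (guess : List Int) (actual : List Int) (out : List Int) : Prop :=
  out = align_guess_alt guess actual
instance (guess : List Int) (actual : List Int) (out : List Int) : Decidable (Spec_align_guess guess actual out) := by
  unfold Spec_align_guess; infer_instance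

-- ===== CLAIM (what is proved, stated in full; the proofs are below) =====
def Claim_equal_align_guess : Prop := ∀ (guess : List Int) (actual : List Int),
  Dom_align_guess guess actual → Pre_align_guess guess actual →
  Spec_align_guess guess actual (align_guess guess actual)


-- ===== LEMMAS AND PROOFS =====

-- pointwise characterisation of list equality via getD (both programs are compared pointwise)
lemma pv_eq_iff_getD (xs ys : List Int) (hl : xs.length = ys.length) :
    xs = ys ↔ ∀ j, j < xs.length → xs.getD j 0 = ys.getD j 0 := by
  constructor
  · intro h j hj; rw [h]
  · intro h
    refine List.ext_getElem hl (fun j hj hj' => ?_)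
    have := h j hj
    rwa [List.getD_eq_getElem xs 0 hj, List.getD_eq_getElem ys 0 hj'] at this

-- A's branch-1 loop returns guess when no window matches
lemma aLoop1_const (g a : List Int) (l : List Int)
    (h : ∀ i ∈ l, ¬ (g.map (fun n => n + PySem.List.pyGetD a i 0)
        = PySem.List.slice a (some i) (some (i + (g.length : Int))))) :
    aLoop1 g a l = g := by
  induction l with
  | nil => rfl
  | cons i rest ih =>
    simp only [aLoop1]
    rw [if_neg (h i (List.mem_cons_self))]
    exact ih (fun x hx => h x (List.mem_cons_of_mem _ hx))

-- A's branch-1 loop and B's search agree when the two per-index conditions agree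
lemma aLoop1_eq_bSearch (g a dg da : List Int) (l : List Int)
    (h : ∀ i ∈ l,
      ((g.map (fun n => n + PySem.List.pyGetD a i 0)
          = PySem.List.slice a (some i) (some (i + (g.length : Int)))) ↔
       (PySem.List.slice da (some i) (some (i + (g.length : Int) - 1)) = dg))) :
    aLoop1 g a l = bSearch g a dg da l := by
  induction l with
  | nil => rfl
  | cons i rest ih =>
    simp only [aLoop1, bSearch]
    have hi := h i List.mem_cons_self
    by_cases hc : (g.map (fun n => n + PySem.List.pyGetD a i 0)
        = PySem.List.slice a (some i) (some (i + (g.length : Int))))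
    · rw [if_pos hc, if_pos (hi.mp hc)]
    · rw [if_neg hc, if_neg (fun hb => hc (hi.mpr hb))]
      exact ih (fun x hx => h x (List.mem_cons_of_mem _ hx))

-- A's window condition, pointwise
lemma pv_getD_map_add (g : List Int) (s : Int) (j : Nat) (hj : j < g.length) :
    (g.map (fun x => x + s)).getD j 0 = g.getD j 0 + s := by
  rw [List.getD_eq_getElem _ 0 (by simpa using hj), List.getD_eq_getElem g 0 hj, List.getElem_map]

lemma pv_getD_take_drop (a : List Int) (n m j : Nat) (hj : j < m) (hja : n + j < a.length) :
    ((a.drop n).take m).getD j 0 = a.getD (n + j) 0 := by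
  have h1 : j < ((a.drop n).take m).length := by simp; omega
  rw [List.getD_eq_getElem _ 0 h1, List.getD_eq_getElem a 0 hja,
      List.getElem_take, List.getElem_drop]

lemma pv_PA_iff (g a : List Int) (n : Nat) (hn : n + g.length ≤ a.length) :
    (g.map (fun x => x + PySem.List.pyGetD a ((n : Int)) 0)
        = PySem.List.slice a (some ((n : Int))) (some ((n : Int) + (g.length : Int)))) ↔
    (∀ j, j < g.length → g.getD j 0 + a.getD n 0 = a.getD (n + j) 0) := by
  rw [PySem.List.slice_natCast_add, PySem.List.pyGetD_natCast]
  have hlen : (g.map (fun x => x + a.getD n 0)).length = ((a.drop n).take g.length).length := by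
    simp; omega
  rw [pv_eq_iff_getD _ _ hlen]
  simp only [List.length_map]
  constructor
  · intro h j hj
    have := h j hj
    rw [pv_getD_map_add g _ j hj, pv_getD_take_drop a n g.length j hj (by omega)] at this
    exact this
  · intro h j hj
    rw [pv_getD_map_add g _ j hj, pv_getD_take_drop a n g.length j hj (by omega)]
    exact h j hj

-- indexing into a difference list
lemma pv_bDiffs_length (xs : List Int) : (bDiffs xs).length = xs.length - 1 := by
  unfold bDiffs
  rw [PySem.List.slice_from_one]
  simp [List.length_zip]

lemma pv_bDiffs_getD' (xs : List Int) (m : Nat) (hm : m + 1 < xs.length) :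
    (bDiffs xs).getD m 0 = xs.getD (m + 1) 0 - xs.getD m 0 := by
  have hl : m < (bDiffs xs).length := by rw [pv_bDiffs_length]; omega
  rw [List.getD_eq_getElem _ 0 hl, List.getD_eq_getElem xs 0 hm,
      List.getD_eq_getElem xs 0 (by omega)]
  simp only [bDiffs, PySem.List.slice_from_one, List.getElem_map, List.getElem_zip,
    List.getElem_tail]

-- B's window condition (a slice of actual's difference list equals guess's), pointwise
lemma pv_PB_iff (g a : List Int) (n : Nat) (hg : 0 < g.length) (hn : n + g.length ≤ a.length) :
    (PySem.List.slice (bDiffs a) (some ((n : Int)))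
        (some ((n : Int) + (g.length : Int) - 1)) = bDiffs g) ↔
    (∀ j, j + 1 < g.length →
      g.getD (j + 1) 0 - g.getD j 0 = a.getD (n + j + 1) 0 - a.getD (n + j) 0) := by
  have hda : (bDiffs a).length = a.length - 1 := pv_bDiffs_length a
  have hdg : (bDiffs g).length = g.length - 1 := pv_bDiffs_length g
  have hb : ((n : Int) + (g.length : Int) - 1) = (n : Int) + (((g.length - 1 : Nat)) : Int) := by
    omega
  rw [hb, PySem.List.slice_natCast_add]
  have htl : (((bDiffs a).drop n).take (g.length - 1)).length = g.length - 1 := by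
    rw [List.length_take, List.length_drop, hda]; omega
  have hlen : (((bDiffs a).drop n).take (g.length - 1)).length = (bDiffs g).length := by
    rw [htl, hdg]
  rw [pv_eq_iff_getD _ _ hlen]
  constructor
  · intro h j hj
    have := h j (by rw [htl]; omega)
    rw [pv_getD_take_drop _ n (g.length - 1) j (by omega) (by rw [hda]; omega),
        pv_bDiffs_getD' a (n + j) (by omega), pv_bDiffs_getD' g j (by omega)] at this
    exact this.symm
  · intro h j hj
    rw [htl] at hj
    rw [pv_getD_take_drop _ n (g.length - 1) j hj (by rw [hda]; omega),
        pv_bDiffs_getD' a (n + j) (by omega), pv_bDiffs_getD' g j (by omega)]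
    exact (h j (by omega)).symm

-- telescoping: the shifted-window condition is the difference condition, given guess[0] = 0
lemma pv_bridge (g a : List Int) (n : Nat) (h0 : g.getD 0 0 = 0) :
    (∀ j, j < g.length → g.getD j 0 + a.getD n 0 = a.getD (n + j) 0) ↔
    (∀ j, j + 1 < g.length →
      g.getD (j + 1) 0 - g.getD j 0 = a.getD (n + j + 1) 0 - a.getD (n + j) 0) := by
  constructor
  · intro h j hj
    have h1 := h j (by omega)
    have h2 := h (j + 1) hj
    have : n + (j + 1) = n + j + 1 := by omega
    rw [this] at h2
    omega
  · intro h j hj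
    induction j with
    | zero => simpa using h0
    | succ k ih =>
      have hk := ih (by omega)
      have hd := h k (by omega)
      have : n + (k + 1) = n + k + 1 := by omega
      rw [this]
      omega

-- A's branch-2 loop skips a prefix of indices where the condition fails
lemma aLoop2_skip (g a : List Int) (l1 l2 : List Int)
    (h : ∀ i ∈ l1, ¬ (PySem.List.slice (g.map (fun n => n - PySem.List.pyGetD a i 0))
        (some i) none = a)) :
    aLoop2 g a (l1 ++ l2) = aLoop2 g a l2 := by
  induction l1 with
  | nil => rfl
  | cons i rest ih =>
    simp only [List.cons_append, aLoop2]
    rw [if_neg (h i List.mem_cons_self)]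
    exact ih (fun x hx => h x (List.mem_cons_of_mem _ hx))


-- branch 2: pointwise value of the shifted, dropped guess
lemma pv_getD_map_sub_drop (g : List Int) (s : Int) (k j : Nat) (hj : k + j < g.length) :
    ((g.drop k).map (fun x => x - s)).getD j 0 = g.getD (k + j) 0 - s := by
  have h1 : j < ((g.drop k).map (fun x => x - s)).length := by simp; omega
  rw [List.getD_eq_getElem _ 0 h1, List.getElem_map, List.getElem_drop,
      List.getD_eq_getElem g 0 hj]

-- branch 2: A's tail condition at the single feasible offset equals B's check
lemma pv_branch2_iff (g a : List Int) (k : Nat) (hk : k = g.length - a.length)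
    (hla : a.length ≤ g.length) :
    (PySem.List.slice (g.map (fun n => n - PySem.List.pyGetD a ((k : Int)) 0))
        (some ((k : Int))) none = a) ↔
    ((PySem.List.pyRange 0 ((a.length : Int)) 1).all
        (fun j => PySem.List.pyGetD g ((k : Int) + j) 0 - PySem.List.pyGetD a ((k : Int)) 0
            == PySem.List.pyGetD a j 0) = true) := by
  rw [PySem.List.slice_from_natCast, ← List.map_drop]
  simp only [PySem.List.pyGetD_natCast]
  have hlen : ((g.drop k).map (fun n => n - a.getD k 0)).length = a.length := by simp; omega
  rw [pv_eq_iff_getD _ _ hlen, hlen, List.all_eq_true]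
  constructor
  · intro h x hx
    rw [PySem.List.mem_pyRange_one] at hx
    set j := x.toNat with hjdef
    have hxj : x = (j : Int) := by omega
    have hj : j < a.length := by omega
    have := h j hj
    rw [pv_getD_map_sub_drop g _ k j (by omega)] at this
    rw [beq_iff_eq, hxj]
    have hc : ((k : Int) + (j : Int)) = (((k + j : Nat)) : Int) := by push_cast; ring
    rw [hc]
    simp only [PySem.List.pyGetD_natCast]
    exact this
  · intro h j hj
    have hmem : ((j : Int)) ∈ PySem.List.pyRange 0 ((a.length : Int)) 1 := by
      rw [PySem.List.mem_pyRange_one]; constructor <;> [positivity; omega]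
    have := h _ hmem
    have hc : ((k : Int) + (j : Int)) = (((k + j : Nat)) : Int) := by push_cast; ring
    rw [beq_iff_eq, hc] at this
    simp only [PySem.List.pyGetD_natCast] at this
    rw [pv_getD_map_sub_drop g _ k j (by omega)]
    exact this

-- ===== VERDICT (by name: the statement is the Claim_ definition above) =====
theorem align_guess_spec : Claim_equal_align_guess := by
  intro g a _ hpre
  unfold Pre_align_guess at hpre
  unfold Spec_align_guess
  simp only [align_guess, align_guess_alt]
  by_cases hle : g.length ≤ a.length
  · rw [if_pos hle, if_pos hle]
    by_cases h0 : g.length = 0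
    · -- empty guess: A's first window (i = 0) matches trivially and A returns [] = guess
      rw [if_pos (Or.inl h0)]
      have hg : g = [] := List.eq_nil_iff_length_eq_zero.mpr h0
      subst hg
      rw [PySem.List.pyRange_one_cons (by omega)]
      simp only [aLoop1, List.map_nil, List.length_nil, Nat.cast_zero, add_zero]
      rw [if_pos ?hc]
      case hc =>
        rw [PySem.List.slice_zero_start, PySem.List.slice_to a (le_refl (0 : Int))]
        simp
    · by_cases hne : PySem.List.pyGetD g 0 0 ≠ 0
      · -- non-empty guess not starting at 0: no window can match, both return guess
        rw [if_pos (Or.inr hne)]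
        apply aLoop1_const
        intro i hi hPA
        rw [PySem.List.mem_pyRange_one] at hi
        have hieq : i = ((i.toNat : Nat) : Int) := by omega
        have hn' : i.toNat + g.length ≤ a.length := by omega
        rw [hieq] at hPA
        have hpoint := (pv_PA_iff g a i.toNat hn').mp hPA 0 (by omega)
        rw [Nat.add_zero] at hpoint
        apply hne
        rw [PySem.List.pyGetD_zero]
        omega
      · -- guess starts at 0: window match ⟺ difference-sequence match, index by index
        push Not at hne
        rw [if_neg (by push Not; exact ⟨h0, hne⟩)]
        apply aLoop1_eq_bSearch
        intro i hi
        rw [PySem.List.mem_pyRange_one] at hi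
        have hieq : i = ((i.toNat : Nat) : Int) := by omega
        have hn' : i.toNat + g.length ≤ a.length := by omega
        have h00 : g.getD 0 0 = 0 := by rwa [PySem.List.pyGetD_zero] at hne
        rw [hieq]
        exact (pv_PA_iff g a i.toNat hn').trans
          ((pv_bridge g a i.toNat h00).trans (pv_PB_iff g a i.toNat (by omega) hn').symm)
  · -- second branch: only offset k = len(guess) - len(actual) has the right length
    rw [if_neg hle, if_neg hle]
    have hla : a.length < g.length := by omega
    have h2 : g.length < 2 * a.length := by omega
    have hcast : ((g.length : Int) - (a.length : Int)) = (((g.length - a.length : Nat)) : Int) := by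
      omega
    rw [hcast]
    set k := g.length - a.length with hk
    rw [PySem.List.pyRange_one_succ_right (by positivity),
        aLoop2_skip g a _ _ ?skip]
    case skip =>
      intro i hi hEq
      rw [PySem.List.mem_pyRange_one] at hi
      rw [PySem.List.slice_from (g.map (fun n => n - PySem.List.pyGetD a i 0)) hi.1] at hEq
      have := congrArg List.length hEq
      simp at this
      omega
    simp only [aLoop2]
    by_cases hc : (PySem.List.slice (g.map (fun n => n - PySem.List.pyGetD a ((k : Int)) 0))
        (some ((k : Int))) none = a)
    · rw [if_pos hc, if_pos ((pv_branch2_iff g a k hk (by omega)).mp hc)]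
    · rw [if_neg hc, if_neg (fun hb => hc ((pv_branch2_iff g a k hk (by omega)).mpr hb))]
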